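-- pv_equiv track=rewrite | github.com/dakotalrubin/sumOfSquares | sumOfSquares.py | calculateSumOfSquares
-- ===== SOURCE A (Python) =====
-- def calculateSumOfSquares(index, sum, inputValues):
--   # Ensure the index lies within appropriate bounds
--   if index < len(inputValues):
--     # Attempt to convert the current value from a string to an integer
--     if inputValues[index].isnumeric():
--       currentValue = int(inputValues[index])
--
--       # Check to make sure only positive integers are used in the calculation
--       if currentValue > 0:
--         sum += currentValue * currentValue
--
--     else:
--       # Remove the current value from the inputValues array and reset the index
--       inputValues.remove(inputValues[index])
--       index -= 1
--
--     # Increment the index for each recursive method call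
--     index += 1
--
--     # Use recursion to calculate the sum of squares
--     sum = calculateSumOfSquares(index, sum, inputValues)
--
--   return sum
-- ===== SOURCE B (Python) =====
-- def calculateSumOfSquares(index, sum, inputValues):
--     # Snapshot the portion to scan; A visits exactly these original elements once,
--     # because its .remove-by-value never disturbs the not-yet-visited suffix.
--     tail = inputValues[index:]
--     # Reproduce A's in-place mutation: each non-numeric visited value triggers a
--     # first-occurrence removal from inputValues, in scan order.
--     for s in tail:
--         if not s.isnumeric():
--             inputValues.remove(s)
--     # The returned value is a plain filtered sum of squares over the snapshot.
--     for s in tail: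
--         if s.isnumeric():
--             v = int(s)
--             if v > 0:
--                 sum += v * v
--     return sum
-- ===== Notes on version B (the rewrite author's own statement) =====
-- stated objective: simpler
-- what changed: A is a mutating tail recursion that re-enters itself after every element and stalls the cursor on each in-place .remove; B snapshots the suffix inputValues[index:] once, replays the removals in one pass, and returns the sum via a plain filtered fold over the snapshot (no recursion, no index bookkeeping).
-- outside the precondition, e.g. on calculateSumOfSquares(-1, 0, ['2']): A returns 8, B returns 4
import Mathlib
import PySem

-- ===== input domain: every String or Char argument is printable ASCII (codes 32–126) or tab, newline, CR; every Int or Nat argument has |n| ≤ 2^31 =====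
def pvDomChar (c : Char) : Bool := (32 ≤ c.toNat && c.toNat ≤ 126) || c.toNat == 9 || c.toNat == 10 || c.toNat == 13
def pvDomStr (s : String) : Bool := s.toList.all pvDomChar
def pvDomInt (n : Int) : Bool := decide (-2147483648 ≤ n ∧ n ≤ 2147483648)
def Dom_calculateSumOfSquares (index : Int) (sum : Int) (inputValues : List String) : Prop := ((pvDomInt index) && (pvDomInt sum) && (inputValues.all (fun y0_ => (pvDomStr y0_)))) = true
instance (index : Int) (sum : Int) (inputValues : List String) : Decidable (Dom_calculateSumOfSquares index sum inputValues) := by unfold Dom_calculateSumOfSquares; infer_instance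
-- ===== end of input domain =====

-- B replaces A's mutating tail recursion by one snapshot of the suffix and a plain filtered
-- fold over it (objective: simpler). Python A mutates inputValues in place (removes non-numeric
-- entries); Python B performs the same mutation, but the equivalence proved here is about the
-- RETURN value only (Lean lists are immutable).

-- ===== PORT A =====
-- '.isnumeric()' is ported as PySem.Str.strIsdigit: exact on the ASCII domain (Dom_).
-- 'int(s)' after a successful isnumeric test always succeeds: the .getD 0 default is unreachable.
def calculateSumOfSquares (index : Int) (sum : Int) (inputValues : List String) : Int :=
  if h : index < (inputValues.length : Int) then
    match hg : PySem.List.pyGet? inputValues index with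
    | none => sum        -- IndexError (index < -len); excluded by Pre_
    | some s =>
      if PySem.Str.strIsdigit s then
        let currentValue := (PySem.Int.ofStr? s).getD 0
        let sum' := if currentValue > 0 then sum + currentValue * currentValue else sum
        calculateSumOfSquares (index + 1) sum' inputValues
      else
        match hr : PySem.List.remove? inputValues s with
        | none => sum    -- unreachable: s was read from inputValues
        | some l' => calculateSumOfSquares ((index - 1) + 1) sum l'
  else sum
termination_by ((inputValues.length : Int) + 1 - index).toNat
decreasing_by
  · omega
  · have hs : s ∈ inputValues := by
      by_contra hns
      simp [(PySem.List.remove?_eq_none_iff inputValues s).mpr hns] at hr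
    have heq : l' = inputValues.erase s := by
      rw [PySem.List.remove?_eq_some_erase inputValues s hs] at hr
      exact ((Option.some.injEq _ _).mp hr).symm
    have hl : l'.length = inputValues.length - 1 := by
      rw [heq]; exact List.length_erase_of_mem hs
    have hpos : 0 < inputValues.length := List.length_pos_of_mem hs
    omega

-- ===== PORT B =====
-- the body of Source B's second loop ('if s.isnumeric(): v = int(s); if v > 0: sum += v*v')
def pvStep (acc : Int) (s : String) : Int :=
  if PySem.Str.strIsdigit s then
    let v := (PySem.Int.ofStr? s).getD 0
    if v > 0 then acc + v * v else acc
  else acc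

-- Source B's first loop only mutates the Python list in place; it does not touch the returned
-- value, so it has no counterpart on immutable Lean lists.
def calculateSumOfSquares_alt (index : Int) (sum : Int) (inputValues : List String) : Int :=
  let tail := PySem.List.slice inputValues (some index) none   -- inputValues[index:]
  tail.foldl pvStep sum

-- ===== PRECONDITION & SPEC =====
-- Pre_ excludes negative cursors: below -len A raises IndexError (and a removal can push an
-- in-range negative cursor below -len mid-run), while in the wrap region Python's
-- negative-index wraparound makes A re-scan the whole list — outside the 0-based use of index.
def Pre_calculateSumOfSquares (index : Int) (sum : Int) (inputValues : List String) : Prop :=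
  0 ≤ index
instance (index : Int) (sum : Int) (inputValues : List String) : Decidable (Pre_calculateSumOfSquares index sum inputValues) := by unfold Pre_calculateSumOfSquares; infer_instance

def pvWitness_calculateSumOfSquares : Int × Int × List String := (0, 0, ["3", "a b", "12"])

def Spec_calculateSumOfSquares (index : Int) (sum : Int) (inputValues : List String) (out : Int) : Prop := out = calculateSumOfSquares_alt index sum inputValues
instance (index : Int) (sum : Int) (inputValues : List String) (out : Int) : Decidable (Spec_calculateSumOfSquares index sum inputValues out) := by unfold Spec_calculateSumOfSquares; infer_instance

-- ===== CLAIM (what is proved, stated in full; the proofs are below) =====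
def Claim_equal_calculateSumOfSquares : Prop := ∀ (index : Int) (sum : Int) (inputValues : List String), Dom_calculateSumOfSquares index sum inputValues → Pre_calculateSumOfSquares index sum inputValues → Spec_calculateSumOfSquares index sum inputValues (calculateSumOfSquares index sum inputValues)

-- ===== LEMMAS AND PROOFS =====

-- erasing the first occurrence of the value found at position n leaves the suffix after n intact
lemma pv_erase_drop {l : List String} {n : Nat} (h : n < l.length) :
    (l.erase l[n]).drop n = l.drop (n + 1) := by
  induction l generalizing n with
  | nil => simp at h
  | cons a t ih =>
    cases n with
    | zero => simp
    | succ n =>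
      have hn : n < t.length := by simpa using h
      have hx : (a :: t)[n + 1] = t[n] := by simp
      rw [hx, List.erase_cons]
      by_cases hax : a = t[n]
      · simp [hax]
      · have : (a == t[n]) = false := by simp [hax]
        simp only [this, Bool.false_eq_true, if_false, List.drop_succ_cons]
        exact ih hn

-- A's recursion, started at a natural cursor n, is the fold of pvStep over l.drop n
lemma pv_A_eq_fold (m : Nat) : ∀ (l : List String) (n : Nat) (sum : Int),
    l.length - n ≤ m →
    calculateSumOfSquares (n : Int) sum l = (l.drop n).foldl pvStep sum := by
  induction m with
  | zero =>
    intro l n sum hm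
    have hlen : l.length ≤ n := by omega
    rw [calculateSumOfSquares, dif_neg (by exact_mod_cast not_lt.mpr hlen),
        List.drop_eq_nil_of_le hlen, List.foldl_nil]
  | succ m ih =>
    intro l n sum hm
    by_cases h : n < l.length
    · have hInt : (n : Int) < (l.length : Int) := by exact_mod_cast h
      have hget : PySem.List.pyGet? l (n : Int) = some l[n] := by
        rw [PySem.List.pyGet?_natCast]; exact List.getElem?_eq_getElem h
      rw [calculateSumOfSquares, dif_pos hInt, hget]
      have hdrop : l.drop n = l[n] :: l.drop (n + 1) := List.drop_eq_getElem_cons h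
      by_cases hd : PySem.Str.strIsdigit l[n]
      · simp only [hd, if_true]
        have hcast : ((n : Int) + 1) = ((n + 1 : Nat) : Int) := by push_cast; ring
        rw [hcast, ih l (n + 1) _ (by omega), hdrop, List.foldl_cons]
        simp only [pvStep, hd, if_true]
      · simp only [hd, Bool.false_eq_true, if_false]
        have hs : l[n] ∈ l := List.getElem_mem h
        split
        · next heq =>
            exact absurd hs ((PySem.List.remove?_eq_none_iff l l[n]).mp heq)
        · next l' heq =>
            rw [PySem.List.remove?_eq_some_erase l l[n] hs] at heq
            obtain rfl : l' = l.erase l[n] := ((Option.some.injEq _ _).mp heq).symm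
            have hn1 : ((n : Int) - 1 + 1) = (n : Int) := by ring
            rw [hn1, ih (l.erase l[n]) n sum
                (by have := List.length_erase_of_mem hs; omega),
              pv_erase_drop h, hdrop, List.foldl_cons]
            simp only [pvStep, hd, Bool.false_eq_true, if_false]
    · have hlen : l.length ≤ n := by omega
      rw [calculateSumOfSquares, dif_neg (by exact_mod_cast not_lt.mpr hlen),
          List.drop_eq_nil_of_le hlen, List.foldl_nil]

-- ===== VERDICT (by name: the statement is the Claim_ definition above) =====
theorem calculateSumOfSquares_spec : Claim_equal_calculateSumOfSquares := by
  intro index sum l _ hpre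
  show calculateSumOfSquares index sum l
      = (PySem.List.slice l (some index) none).foldl pvStep sum
  rw [PySem.List.slice_from l hpre]
  have hidx : ((index.toNat : Nat) : Int) = index := Int.toNat_of_nonneg hpre
  calc calculateSumOfSquares index sum l
      = calculateSumOfSquares ((index.toNat : Nat) : Int) sum l := by rw [hidx]
    _ = (l.drop index.toNat).foldl pvStep sum := pv_A_eq_fold l.length l index.toNat sum (by omega)
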